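-- pv_equiv track=rewrite | github.com/GammA-su/forgeplusplus | forge_carve/src/fc/util/constrained_decode.py | _should_mask_apply_arith_operator
-- ===== SOURCE A (Python) =====
-- def _should_mask_apply_arith_operator(toks: list[str]) -> bool:
--     if not toks:
--         return False
--     last_apply = -1
--     for idx in range(len(toks) - 1, -1, -1):
--         if toks[idx] == "APPLY_ARITH":
--             last_apply = idx
--             break
--     if last_apply < 0:
--         return False
--     for j in range(last_apply + 1, len(toks)):
--         if toks[j] == "VAL":
--             return len(toks) == j + 1
--     return False
-- ===== SOURCE B (Python) =====
-- def _should_mask_apply_arith_operator(toks: list[str]) -> bool: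
--     if not toks or toks[-1] != "VAL":
--         return False
--     for tok in reversed(toks[:-1]):
--         if tok == "APPLY_ARITH":
--             return True
--         if tok == "VAL":
--             return False
--     return False
-- ===== Notes on version B (the rewrite author's own statement) =====
-- stated objective: simpler
-- what changed: Replaced A's two loops (backward search for the last APPLY_ARITH, then a forward scan for the first VAL after it) by a single backward pass that first checks the final token is VAL and then returns True/False at the first APPLY_ARITH/VAL seen going backward.
import Mathlib
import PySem

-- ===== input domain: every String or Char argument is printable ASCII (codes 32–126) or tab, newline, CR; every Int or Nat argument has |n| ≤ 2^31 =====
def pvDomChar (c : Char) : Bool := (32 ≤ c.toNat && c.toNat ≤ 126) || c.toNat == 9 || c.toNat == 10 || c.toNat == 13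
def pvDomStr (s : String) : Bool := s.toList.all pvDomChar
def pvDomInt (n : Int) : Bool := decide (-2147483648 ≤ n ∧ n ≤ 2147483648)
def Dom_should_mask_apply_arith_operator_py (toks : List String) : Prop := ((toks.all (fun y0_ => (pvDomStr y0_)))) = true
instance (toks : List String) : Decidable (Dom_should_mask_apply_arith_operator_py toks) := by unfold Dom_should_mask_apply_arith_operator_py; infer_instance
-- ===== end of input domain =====

-- B is a simpler single backward pass keyed off the final token; return values proved equal to A's everywhere (no mutation in either program).

-- ===== PORT A =====
-- 'for idx in range(len(toks)-1, -1, -1): if toks[idx] == "APPLY_ARITH": last_apply = idx; break'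
def pvAFindLast (toks : List String) : List Int → Int
  | [] => -1
  | i :: rest =>
    if PySem.List.pyGetD toks i "" = "APPLY_ARITH" then i
    else pvAFindLast toks rest

-- 'for j in range(last_apply+1, len(toks)): if toks[j] == "VAL": return len(toks) == j+1'
def pvAScan (toks : List String) : List Int → Bool
  | [] => false
  | j :: rest =>
    if PySem.List.pyGetD toks j "" = "VAL" then decide (PySem.List.len toks = j + 1)
    else pvAScan toks rest

def should_mask_apply_arith_operator_py (toks : List String) : Bool :=
  if toks = [] then false
  else
    let last_apply := pvAFindLast toks (PySem.List.pyRange (PySem.List.len toks - 1) (-1) (-1))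
    if last_apply < 0 then false
    else pvAScan toks (PySem.List.pyRange (last_apply + 1) (PySem.List.len toks) 1)

-- ===== PORT B =====
-- 'for tok in reversed(toks[:-1]): …' (toks[:-1] reversed = toks.dropLast.reverse)
def pvBScan : List String → Bool
  | [] => false
  | t :: rest =>
    if t = "APPLY_ARITH" then true
    else if t = "VAL" then false
    else pvBScan rest

def should_mask_apply_arith_operator_py_alt (toks : List String) : Bool :=
  match toks.getLast? with          -- 'if not toks or toks[-1] != "VAL": return False'
  | none => false
  | some t =>
    if t ≠ "VAL" then false
    else pvBScan toks.dropLast.reverse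

-- ===== PRECONDITION & SPEC =====
def Spec_should_mask_apply_arith_operator_py (toks : List String) (out : Bool) : Prop := out = should_mask_apply_arith_operator_py_alt toks
instance (toks : List String) (out : Bool) : Decidable (Spec_should_mask_apply_arith_operator_py toks out) := by unfold Spec_should_mask_apply_arith_operator_py; infer_instance

-- ===== CLAIM (what is proved, stated in full; the proofs are below) =====
def Claim_equal_should_mask_apply_arith_operator_py : Prop := ∀ (toks : List String), Dom_should_mask_apply_arith_operator_py toks → Spec_should_mask_apply_arith_operator_py toks (should_mask_apply_arith_operator_py toks)

-- ===== LEMMAS AND PROOFS =====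

-- Backward scan for the last "APPLY_ARITH", phrased on the reversed prefix.
def pvRevFind (m : Int) : List String → Int
  | [] => -1
  | t :: rest => if t = "APPLY_ARITH" then m - 1 else pvRevFind (m - 1) rest

theorem pvRevFind_le {rs : List String} {m : Int} (h : 0 ≤ pvRevFind m rs) :
    pvRevFind m rs ≤ m - 1 := by
  induction rs generalizing m with
  | nil => simp [pvRevFind] at h
  | cons t rest ih =>
    by_cases ht : t = "APPLY_ARITH"
    · simp [pvRevFind, ht]
    · simp only [pvRevFind, if_neg ht] at h ⊢
      have := ih h
      omega

theorem pvAFindLast_eq_revFind (toks : List String) (m : Nat) (hm : m ≤ toks.length) :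
    pvAFindLast toks (PySem.List.pyRange ((m : Int) - 1) (-1) (-1)) =
      pvRevFind (m : Int) ((toks.take m).reverse) := by
  induction m with
  | zero => simp [PySem.List.pyRange_neg_one_eq_nil, pvAFindLast, pvRevFind]
  | succ k ih =>
    have hk : k < toks.length := hm
    have hpeel : PySem.List.pyRange (((k : Int) + 1) - 1) (-1) (-1)
        = ((k : Int)) :: PySem.List.pyRange ((k : Int) - 1) (-1) (-1) := by
      have : ((k : Int) + 1) - 1 = (k : Int) := by ring
      rw [this, PySem.List.pyRange_neg_one_cons (by omega)]
    have htake : (toks.take (k + 1)).reverse = toks[k] :: (toks.take k).reverse := by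
      rw [List.take_add_one]
      simp [List.getElem?_eq_getElem hk]
    have hget : PySem.List.pyGetD toks ((k : Int)) "" = toks[k] := by
      rw [PySem.List.pyGetD_natCast]
      simp [List.getD, List.getElem?_eq_getElem hk]
    push_cast
    rw [hpeel, htake]
    by_cases h : toks[k] = "APPLY_ARITH"
    · simp [pvAFindLast, pvRevFind, hget, h]
    · simp only [pvAFindLast, pvRevFind, hget, if_neg h]
      have : ((k : Int) + 1) - 1 = (k : Int) := by ring
      rw [this]
      exact ih (Nat.le_of_lt hk)

-- the forward scan reaches the final "VAL" with nothing in between: returns true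
theorem pvAScan_true (ws : List String) (hws : "VAL" ∉ ws) :
    ∀ (toks : List String) (s : Nat), toks.drop s = ws ++ ["VAL"] →
      pvAScan toks (PySem.List.pyRange ((s : Int)) (PySem.List.len toks) 1) = true := by
  induction ws with
  | nil =>
    intro toks s hdrop
    have hs : s < toks.length := by
      have := congrArg List.length hdrop; simp at this; omega
    have hlen : toks.length = s + 1 := by
      have := congrArg List.length hdrop; simp at this; omega
    have hget : toks[s] = "VAL" := by
      have : (toks.drop s)[0]'(by simp [hdrop]) = "VAL" := by simp [hdrop]
      simpa [List.getElem_drop] using this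
    rw [PySem.List.len_eq, PySem.List.pyRange_one_cons (by exact_mod_cast hs)]
    simp [pvAScan, PySem.List.pyGetD_natCast, List.getD, hget, hlen]
  | cons w rest ih =>
    intro toks s hdrop
    have hs : s < toks.length := by
      have := congrArg List.length hdrop; simp at this; omega
    have hget : toks[s] = w := by
      have : (toks.drop s)[0]'(by simp [hdrop]) = w := by simp [hdrop]
      simpa [List.getElem_drop] using this
    have hw : w ≠ "VAL" := fun h => hws (by simp [h])
    have hdrop' : toks.drop (s + 1) = rest ++ ["VAL"] := by
      have := congrArg List.tail hdrop
      simpa [List.tail_drop] using this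
    rw [PySem.List.len_eq, PySem.List.pyRange_one_cons (by exact_mod_cast hs)]
    simp only [pvAScan, PySem.List.pyGetD_natCast, List.getD, List.getElem?_eq_getElem hs,
      Option.getD_some, hget, if_neg hw]
    have := ih (fun h => hws (by simp [h])) toks (s + 1) hdrop'
    rw [PySem.List.len_eq] at this
    push_cast at this ⊢
    exact this

-- a "VAL" strictly before the final token: the forward scan returns false
theorem pvAScan_false_of_early_val (ws2 : List String) :
    ∀ (toks : List String) (s : Nat), toks.drop s = ws2 → "VAL" ∈ ws2.dropLast →
      pvAScan toks (PySem.List.pyRange ((s : Int)) (PySem.List.len toks) 1) = false := by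
  induction ws2 with
  | nil => intro toks s _ hmem; simp at hmem
  | cons w rest ih =>
    intro toks s hdrop hmem
    have hrest : rest ≠ [] := by
      rcases rest with _ | _
      · simp at hmem
      · simp
    have hs : s < toks.length := by
      have := congrArg List.length hdrop; simp at this; omega
    have hlen : s + 1 < toks.length := by
      have := congrArg List.length hdrop
      simp at this
      rcases rest with _ | ⟨a, b⟩ <;> simp_all <;> omega
    have hget : toks[s] = w := by
      have : (toks.drop s)[0]'(by simp [hdrop]) = w := by simp [hdrop]
      simpa [List.getElem_drop] using this
    have hdrop' : toks.drop (s + 1) = rest := by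
      have := congrArg List.tail hdrop
      simpa [List.tail_drop] using this
    rw [PySem.List.len_eq, PySem.List.pyRange_one_cons (by exact_mod_cast hs)]
    simp only [pvAScan, PySem.List.pyGetD_natCast, List.getD, List.getElem?_eq_getElem hs,
      Option.getD_some, hget]
    by_cases hw : w = "VAL"
    · rw [if_pos hw]
      simp only [decide_eq_false_iff_not, PySem.List.len_eq]
      omega
    · rw [if_neg hw]
      have hmem' : "VAL" ∈ rest.dropLast := by
        rw [List.dropLast_cons_of_ne_nil hrest] at hmem
        rcases List.mem_cons.mp hmem with h | h
        · exact absurd h.symm hw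
        · exact h
      have := ih toks (s + 1) hdrop' hmem'
      rw [PySem.List.len_eq] at this
      push_cast at this ⊢
      exact this

-- last token is not "VAL": the forward scan returns false wherever it starts
theorem pvAScan_false_of_last_ne (toks : List String) (hlast : toks.getLast? ≠ some "VAL") :
    ∀ (k s : Nat), toks.length - s ≤ k →
      pvAScan toks (PySem.List.pyRange ((s : Int)) (PySem.List.len toks) 1) = false := by
  intro k
  induction k with
  | zero =>
    intro s hk
    rw [PySem.List.len_eq, PySem.List.pyRange_one_eq_nil (by omega)]
    simp [pvAScan]
  | succ k ih =>
    intro s hk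
    by_cases hs : s < toks.length
    · rw [PySem.List.len_eq, PySem.List.pyRange_one_cons (by exact_mod_cast hs)]
      simp only [pvAScan, PySem.List.pyGetD_natCast, List.getD, List.getElem?_eq_getElem hs,
        Option.getD_some]
      by_cases hv : toks[s] = "VAL"
      · rw [if_pos hv]
        simp only [decide_eq_false_iff_not, PySem.List.len_eq]
        intro heq
        apply hlast
        have hsl : s = toks.length - 1 := by omega
        rw [List.getLast?_eq_getElem?]
        subst hsl
        rw [List.getElem?_eq_getElem hs, hv]
      · rw [if_neg hv]
        have := ih (s + 1) (by omega)
        rw [PySem.List.len_eq] at this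
        push_cast at this ⊢
        exact this
    · rw [PySem.List.len_eq, PySem.List.pyRange_one_eq_nil (by omega)]
      simp [pvAScan]

-- main invariant: tokens between the scanned prefix zs and the final "VAL" are neutral
theorem pvKey (zs : List String) : ∀ (ws : List String),
    (∀ w ∈ ws, w ≠ "VAL" ∧ w ≠ "APPLY_ARITH") →
    (let toks := zs ++ ws ++ ["VAL"];
     let la := pvRevFind ((zs.length : Int)) zs.reverse;
     (if la < 0 then false
      else pvAScan toks (PySem.List.pyRange (la + 1) (PySem.List.len toks) 1)) =
        pvBScan zs.reverse) := by
  induction zs using List.reverseRecOn with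
  | nil => intro ws _; simp [pvRevFind, pvBScan]
  | append_singleton zs' x ih =>
    intro ws hws
    dsimp only
    by_cases hx : x = "APPLY_ARITH"
    · -- la = zs'.length; forward scan runs over ws ++ ["VAL"] and returns true
      have hla : pvRevFind ((((zs' ++ [x]).length : Nat)) : Int) (zs' ++ [x]).reverse
          = (zs'.length : Int) := by
        simp [pvRevFind, hx]
      have hb : pvBScan (zs' ++ [x]).reverse = true := by simp [pvBScan, hx]
      rw [hla, hb, if_neg (by omega)]
      have hdrop : ((zs' ++ [x]) ++ ws ++ ["VAL"]).drop (zs'.length + 1) = ws ++ ["VAL"] := by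
        have h1 : zs'.length + 1 = (zs' ++ [x]).length := by simp
        rw [List.append_assoc, h1, List.drop_left]
      have hnov : "VAL" ∉ ws := fun h => (hws _ h).1 rfl
      have hscan := pvAScan_true ws hnov ((zs' ++ [x]) ++ ws ++ ["VAL"]) (zs'.length + 1) hdrop
      rw [← hscan]
      norm_cast
    · by_cases hv : x = "VAL"
      · -- la is the last APPLY_ARITH inside zs'; if found, the scan meets x="VAL" early → false
        have hla : pvRevFind ((((zs' ++ [x]).length : Nat)) : Int) (zs' ++ [x]).reverse
            = pvRevFind ((zs'.length : Int)) zs'.reverse := by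
          simp [pvRevFind, hx]
        have hb : pvBScan (zs' ++ [x]).reverse = false := by simp [pvBScan, hv]
        rw [hla, hb]
        set la := pvRevFind ((zs'.length : Int)) zs'.reverse with hlaeq
        by_cases hneg : la < 0
        · rw [if_pos hneg]
        · rw [if_neg hneg]
          have hle : la ≤ (zs'.length : Int) - 1 := pvRevFind_le (by omega)
          have h2 : la.toNat + 1 ≤ (zs' ++ [x]).length := by simp; omega
          have h3 : la.toNat + 1 ≤ zs'.length := by omega
          have hdrop : ((zs' ++ [x]) ++ ws ++ ["VAL"]).drop (la.toNat + 1)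
              = (zs'.drop (la.toNat + 1) ++ [x]) ++ ws ++ ["VAL"] := by
            rw [List.append_assoc, List.drop_append_of_le_length h2,
              List.drop_append_of_le_length h3]
            simp [List.append_assoc]
          have hmem : "VAL" ∈ ((zs'.drop (la.toNat + 1) ++ [x]) ++ ws ++ ["VAL"]).dropLast := by
            rw [List.append_assoc, List.dropLast_append_of_ne_nil (by simp)]
            simp [hv]
          have hscan := pvAScan_false_of_early_val _ _ (la.toNat + 1) hdrop hmem
          have hn : (((la.toNat + 1 : Nat)) : Int) = la + 1 := by omega
          rw [hn] at hscan
          exact hscan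
      · -- x is neutral: fold it into ws
        have hla : pvRevFind ((((zs' ++ [x]).length : Nat)) : Int) (zs' ++ [x]).reverse
            = pvRevFind ((zs'.length : Int)) zs'.reverse := by
          simp [pvRevFind, hx]
        have hb : pvBScan (zs' ++ [x]).reverse = pvBScan zs'.reverse := by
          simp [pvBScan, hx, hv]
        rw [hla, hb]
        have hkey := ih (x :: ws) (by
          intro w hw
          rcases List.mem_cons.mp hw with h | h
          · exact h ▸ ⟨hv, hx⟩
          · exact hws w h)
        simpa [List.append_assoc] using hkey

theorem pv_main (toks : List String) :
    should_mask_apply_arith_operator_py toks = should_mask_apply_arith_operator_py_alt toks := by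
  induction toks using List.reverseRecOn with
  | nil => rfl
  | append_singleton ys t _ =>
    have hne : ys ++ [t] ≠ [] := by simp
    have hlen : PySem.List.len (ys ++ [t]) = ((ys.length : Int)) + 1 := by
      rw [PySem.List.len_eq]; simp
    have hpeel : PySem.List.pyRange (PySem.List.len (ys ++ [t]) - 1) (-1) (-1)
        = ((ys.length : Int)) :: PySem.List.pyRange ((ys.length : Int) - 1) (-1) (-1) := by
      rw [hlen]
      have h1 : (ys.length : Int) + 1 - 1 = (ys.length : Int) := by ring
      rw [h1, PySem.List.pyRange_neg_one_cons (by omega)]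
    have hgetlast : PySem.List.pyGetD (ys ++ [t]) ((ys.length : Int)) "" = t := by
      rw [PySem.List.pyGetD_natCast]
      simp [List.getD]
    have hB : should_mask_apply_arith_operator_py_alt (ys ++ [t])
        = (if t ≠ "VAL" then false else pvBScan ys.reverse) := by
      unfold should_mask_apply_arith_operator_py_alt
      rw [List.getLast?_concat, List.dropLast_concat]
    unfold should_mask_apply_arith_operator_py
    rw [if_neg hne, hpeel]
    by_cases hx : t = "APPLY_ARITH"
    · have hfl : pvAFindLast (ys ++ [t])
          (((ys.length : Int)) :: PySem.List.pyRange ((ys.length : Int) - 1) (-1) (-1))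
          = ((ys.length : Int)) := by
        simp [pvAFindLast, hx]
      rw [hfl, if_neg (by omega), hlen, PySem.List.pyRange_one_eq_nil (by omega),
        hB, if_pos (by simp [hx])]
      simp [pvAScan]
    · have hfl : pvAFindLast (ys ++ [t])
          (((ys.length : Int)) :: PySem.List.pyRange ((ys.length : Int) - 1) (-1) (-1))
          = pvAFindLast (ys ++ [t]) (PySem.List.pyRange ((ys.length : Int) - 1) (-1) (-1)) := by
        simp [pvAFindLast, hgetlast, hx]
      have hA1 := pvAFindLast_eq_revFind (ys ++ [t]) ys.length (by simp)
      rw [List.take_left] at hA1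
      rw [hfl, hA1]
      by_cases hv : t = "VAL"
      · have hkey := pvKey ys [] (by simp)
        simp only [List.append_nil] at hkey
        rw [hB]
        subst hv
        simpa using hkey
      · rw [hB, if_pos hv]
        set la := pvRevFind ((ys.length : Int)) ys.reverse with hlaeq
        by_cases hneg : la < 0
        · rw [if_pos hneg]
        · rw [if_neg hneg]
          have hlast : (ys ++ [t]).getLast? ≠ some "VAL" := by
            rw [List.getLast?_concat]
            simp [hv]
          have hnat : la + 1 = (((la.toNat + 1 : Nat)) : Int) := by omega
          rw [hnat]
          exact pvAScan_false_of_last_ne (ys ++ [t]) hlast (ys ++ [t]).length (la.toNat + 1)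
            (by omega)

-- ===== VERDICT (by name: the statement is the Claim_ definition above) =====
theorem should_mask_apply_arith_operator_py_spec : Claim_equal_should_mask_apply_arith_operator_py := by
  intro toks _
  unfold Spec_should_mask_apply_arith_operator_py
  exact pv_main toks
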